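-- pv_equiv track=rewrite | github.com/royale32/CE_ME_507_F25_HW_Testing | HW8_LagrangeBasisFuncDerivative/LagrangeBasisFuncDerivative.py | GlobalToLocalIdxs
-- ===== SOURCE A (Python) =====
-- def GlobalToLocalIdxs(A,degs):
--     a_list = []
--     denom = degs[0]+1
--     ai = A % (degs[0]+1)
--     a_list.append(ai)
--     for i in range(1,len(degs)):
--         a_list.append(A//denom)
--         deg = degs[i]             # since p0 starts at i = 1
--         denom *= (deg+1)
--     return a_list
-- ===== SOURCE B (Python) =====
-- def GlobalToLocalIdxs(A, degs):
--     head = A % (degs[0] + 1)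
--     # total product of all divisors used by any output position
--     p = 1
--     for d in degs[:-1]:
--         p *= d + 1
--     # build the tail BACK-TO-FRONT: strip one divisor off the product per step
--     tail = []
--     for d in reversed(degs[:-1]):
--         tail.append(A // p)
--         p //= d + 1
--     tail.reverse()
--     return [head] + tail
-- ===== Notes on version B (the rewrite author's own statement) =====
-- stated objective: alternative
-- what changed: Instead of A's forward pass interleaving output appends with a growing running product, B computes the full divisor product once and then builds the tail back-to-front in a reversed pass, recovering each earlier prefix product by stripping one divisor off the product with exact division.
import Mathlib
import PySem

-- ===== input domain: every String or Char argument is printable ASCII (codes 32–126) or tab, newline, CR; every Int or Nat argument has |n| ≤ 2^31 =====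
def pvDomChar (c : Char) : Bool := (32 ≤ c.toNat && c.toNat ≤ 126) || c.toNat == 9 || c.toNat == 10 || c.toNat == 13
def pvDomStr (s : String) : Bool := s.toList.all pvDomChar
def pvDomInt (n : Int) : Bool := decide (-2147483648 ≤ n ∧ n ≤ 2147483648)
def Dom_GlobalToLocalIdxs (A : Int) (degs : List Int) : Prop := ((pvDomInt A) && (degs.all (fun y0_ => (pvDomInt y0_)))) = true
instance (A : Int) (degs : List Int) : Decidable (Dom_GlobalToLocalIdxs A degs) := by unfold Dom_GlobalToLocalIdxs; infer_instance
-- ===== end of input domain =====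

-- B computes the full divisor product once, then builds the tail of the result
-- BACK-TO-FRONT, stripping one divisor off the product by exact division per step
-- (alternative decomposition: reversed traversal, product maintained by division).


-- ===== PORT A =====
-- A's loop: accumulator (a_list, denom); for each degs[i] (i ≥ 1): append A//denom, denom *= degs[i]+1.
def GlobalToLocalIdxs (A : Int) (degs : List Int) : List Int :=
  match degs with
  | [] => []  -- IndexError in Python (degs[0]); excluded by Pre_
  | d0 :: rest =>
    let init : List Int × Int := ([PySem.Int.mod A (d0 + 1)], d0 + 1)
    (rest.foldl (fun st deg => (st.1 ++ [PySem.Int.floordiv A st.2], st.2 * (deg + 1))) init).1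

-- ===== PORT B =====
-- head = A % (degs[0]+1); p = product of (d+1) over degs[:-1];
-- then over reversed(degs[:-1]): append A//p, p //= d+1; reverse the tail and prepend head.
def GlobalToLocalIdxs_alt (A : Int) (degs : List Int) : List Int :=
  match degs with
  | [] => []  -- IndexError in Python (degs[0]); excluded by Pre_
  | d0 :: _ =>
    let head := PySem.Int.mod A (d0 + 1)
    let p : Int := degs.dropLast.foldl (fun p d => p * (d + 1)) 1
    let st := degs.dropLast.reverse.foldl
      (fun (st : List Int × Int) d =>
        (st.1 ++ [PySem.Int.floordiv A st.2], PySem.Int.floordiv st.2 (d + 1)))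
      ([], p)
    head :: st.1.reverse

-- ===== PRECONDITION & SPEC =====
-- Pre_ excludes exactly the inputs where Python A raises: empty degs (IndexError) and a -1 degree
-- used as part of a divisor (ZeroDivisionError).
def Pre_GlobalToLocalIdxs (A : Int) (degs : List Int) : Prop :=
  degs ≠ [] ∧ degs.head! + 1 ≠ 0 ∧ ∀ d ∈ degs.dropLast, d + 1 ≠ 0
instance (A : Int) (degs : List Int) : Decidable (Pre_GlobalToLocalIdxs A degs) := by
  unfold Pre_GlobalToLocalIdxs; infer_instance
def pvWitness_GlobalToLocalIdxs : Int × List Int := (13, [2, 3, 1])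

def Spec_GlobalToLocalIdxs (A : Int) (degs : List Int) (out : List Int) : Prop := out = GlobalToLocalIdxs_alt A degs
instance (A : Int) (degs : List Int) (out : List Int) : Decidable (Spec_GlobalToLocalIdxs A degs out) := by unfold Spec_GlobalToLocalIdxs; infer_instance

-- ===== CLAIM (what is proved, stated in full; the proofs are below) =====
def Claim_equal_GlobalToLocalIdxs : Prop := ∀ (A : Int) (degs : List Int), Dom_GlobalToLocalIdxs A degs → Pre_GlobalToLocalIdxs A degs → Spec_GlobalToLocalIdxs A degs (GlobalToLocalIdxs A degs)

-- ===== LEMMAS AND PROOFS =====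

-- A's fold, from any accumulator/denominator, appends exactly the divisions by the
-- running prefix products (all but the last value of the scanl).
theorem pv_foldl_eq_scanl (A denom : Int) (acc : List Int) (rest : List Int) :
    (rest.foldl (fun (st : List Int × Int) deg =>
        (st.1 ++ [PySem.Int.floordiv A st.2], st.2 * (deg + 1))) (acc, denom)).1
      = acc ++ ((List.scanl (fun p d => p * (d + 1)) denom rest).dropLast).map
          (fun p => PySem.Int.floordiv A p) := by
  induction rest generalizing acc denom with
  | nil => simp
  | cons x t ih =>
      simp only [List.foldl_cons, List.scanl_cons]
      rw [ih]
      cases t with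
      | nil => simp
      | cons y u => simp

-- dropLast commutes with scanl on a nonempty list.
theorem pv_scanl_dropLast (f : Int → Int → Int) (c : Int) (l : List Int) (h : l ≠ []) :
    (List.scanl f c l).dropLast = List.scanl f c l.dropLast := by
  induction l generalizing c with
  | nil => simp at h
  | cons x t ih =>
      cases t with
      | nil => simp
      | cons y u =>
          simp only [List.scanl_cons, List.dropLast_cons₂]
          rw [← ih (f c x) (by simp)]
          simp [List.scanl_cons]

-- exact division: (q*b) // b = q for b ≠ 0 (Python floor division is exact on multiples).
theorem pv_exact_div (q b : Int) (h : b ≠ 0) : PySem.Int.floordiv (q * b) b = q := by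
  simp [PySem.Int.floordiv]
  exact Int.mul_fdiv_cancel _ h

-- B's product loop is the prefix product scaled by the seed.
theorem pv_foldl_prod (q : Int) (l : List Int) :
    l.foldl (fun p d => p * (d + 1)) q = q * (l.map (fun d => d + 1)).prod := by
  induction l generalizing q with
  | nil => simp
  | cons d t ih => simp [List.foldl_cons, ih (q * (d + 1)), mul_assoc]

-- B's backward fold, started at q times the full product, produces the reversed list of
-- divisions by the running prefix products and ends with divisor q.
theorem pv_back (A q : Int) (acc : List Int) (l : List Int) (h : ∀ d ∈ l, d + 1 ≠ 0) :
    l.reverse.foldl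
      (fun (st : List Int × Int) d =>
        (st.1 ++ [PySem.Int.floordiv A st.2], PySem.Int.floordiv st.2 (d + 1)))
      (acc, q * (l.map (fun d => d + 1)).prod)
    = (acc ++ (((List.scanl (fun p d => p * (d + 1)) q l).drop 1).map
        (fun p => PySem.Int.floordiv A p)).reverse, q) := by
  induction l generalizing q acc with
  | nil => simp
  | cons d t ih =>
      have hd : d + 1 ≠ 0 := h d (by simp)
      have ht : ∀ x ∈ t, x + 1 ≠ 0 := fun x hx => h x (by simp [hx])
      simp only [List.reverse_cons, List.foldl_append, List.foldl_cons, List.foldl_nil,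
        List.map_cons, List.prod_cons]
      have : q * ((d + 1) * (t.map (fun d => d + 1)).prod)
           = (q * (d + 1)) * (t.map (fun d => d + 1)).prod := by ring
      rw [this, ih (q * (d + 1)) acc ht]
      simp only [List.scanl_cons, List.drop_one, List.tail_cons]
      rw [pv_exact_div q (d + 1) hd]
      cases t with
      | nil => simp
      | cons y u => simp [List.scanl_cons]

-- ===== VERDICT (by name: the statement is the Claim_ definition above) =====
theorem GlobalToLocalIdxs_spec : Claim_equal_GlobalToLocalIdxs := by
  intro A degs _ hpre
  obtain ⟨hne, _, hnz⟩ := hpre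
  unfold Spec_GlobalToLocalIdxs GlobalToLocalIdxs GlobalToLocalIdxs_alt
  cases degs with
  | nil => rfl
  | cons d0 rest =>
      simp only []
      rw [pv_foldl_eq_scanl, pv_foldl_prod 1 (d0 :: rest).dropLast,
        pv_back A 1 [] (d0 :: rest).dropLast hnz]
      cases rest with
      | nil => simp
      | cons r t =>
          rw [pv_scanl_dropLast _ _ _ (by simp)]
          simp [List.scanl_cons]
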